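-- pv_equiv track=rewrite | github.com/rubelw/OSSS | src/OSSS/ai/agents/query_data/handlers/order_line_items_handler.py | _select_order_line_items_fields
-- ===== SOURCE A (Python) =====
-- from typing import Any, Dict, List, Sequence
--
-- def _select_order_line_items_fields(rows: Sequence[Dict[str, Any]]) -> List[str]:
--     if not rows:
--         return []
--
--     preferred_order = [
--         "id",
--         "order_id",
--         "order_code",
--         "line_number",
--         "item_code",
--         "item_description",
--         "quantity",
--         "unit_price",
--         "line_total",
--         "status",
--         "created_at",
--         "updated_at",
--     ]
--
--     all_keys: List[str] = []
--     for r in rows: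
--         for k in r.keys():
--             if k not in all_keys:
--                 all_keys.append(k)
--
--     ordered = [c for c in preferred_order if c in all_keys]
--     ordered.extend(k for k in all_keys if k not in ordered)
--     return ordered
-- ===== SOURCE B (Python) =====
-- from typing import Any, Dict, List, Sequence
--
-- def _select_order_line_items_fields(rows: Sequence[Dict[str, Any]]) -> List[str]:
--     if not rows:
--         return []
--
--     preferred_order = [
--         "id",
--         "order_id",
--         "order_code",
--         "line_number",
--         "item_code",
--         "item_description",
--         "quantity",
--         "unit_price",
--         "line_total",
--         "status",
--         "created_at",
--         "updated_at",
--     ]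
--
--     # Bucket sort in a single pass: each first-seen key goes straight into the
--     # bucket of its preferred rank (unknown keys into the last bucket).
--     unknown = len(preferred_order)
--     rank = {name: i for i, name in enumerate(preferred_order)}
--     buckets: List[List[str]] = [[] for _ in range(unknown + 1)]
--     seen = set()
--     for r in rows:
--         for k in r.keys():
--             if k not in seen:
--                 seen.add(k)
--                 buckets[rank.get(k, unknown)].append(k)
--     return [k for bucket in buckets for k in bucket]
-- ===== Notes on version B (the rewrite author's own statement) =====
-- stated objective: faster
-- what changed: Replaces A's three passes (quadratic list-membership dedup, a filter over preferred_order, then an extend with repeated membership scans of the growing 'ordered' list) by a single bucket-sort pass: each first-seen key (O(1) set test) is appended directly to the bucket of its rank in a precomputed rank dict, and the buckets are flattened.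
import Mathlib
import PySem

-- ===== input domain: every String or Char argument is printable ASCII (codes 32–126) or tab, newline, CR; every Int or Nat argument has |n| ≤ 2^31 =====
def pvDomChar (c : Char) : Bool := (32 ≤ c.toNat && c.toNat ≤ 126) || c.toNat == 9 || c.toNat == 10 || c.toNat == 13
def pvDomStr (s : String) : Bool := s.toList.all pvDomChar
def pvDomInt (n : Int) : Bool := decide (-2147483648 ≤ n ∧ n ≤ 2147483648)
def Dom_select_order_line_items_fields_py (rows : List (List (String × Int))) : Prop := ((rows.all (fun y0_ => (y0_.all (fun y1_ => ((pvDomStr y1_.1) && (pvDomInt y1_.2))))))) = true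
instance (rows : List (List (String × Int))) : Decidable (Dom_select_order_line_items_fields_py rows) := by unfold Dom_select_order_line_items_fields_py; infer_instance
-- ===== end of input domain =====

-- B replaces A's quadratic dedup + filter + extend by a one-pass bucket sort over a rank dict; return values proved equal.


-- ===== PORT A =====
-- the preferred_order literal (shared by both ports, as in the Python sources)
def pvPref : List String :=
  ["id", "order_id", "order_code", "line_number", "item_code", "item_description",
   "quantity", "unit_price", "line_total", "status", "created_at", "updated_at"]

def select_order_line_items_fields_py (rows : List (List (String × Int))) : List String :=
  match rows with
  | [] => []
  | _ :: _ =>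
    let all_keys : List String :=
      rows.foldl (fun acc r =>
        r.foldl (fun acc p => if p.1 ∈ acc then acc else acc ++ [p.1]) acc) []
    let ordered := pvPref.filter (fun c => decide (c ∈ all_keys))
    all_keys.foldl (fun ord k => if k ∈ ord then ord else ord ++ [k]) ordered

-- ===== PORT B =====
-- rank = {name: i for i, name in enumerate(preferred_order)}
def pvRank : PySem.Dict String Nat :=
  PySem.Dict.ofList
    [("id", 0), ("order_id", 1), ("order_code", 2), ("line_number", 3), ("item_code", 4),
     ("item_description", 5), ("quantity", 6), ("unit_price", 7), ("line_total", 8),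
     ("status", 9), ("created_at", 10), ("updated_at", 11)]

def select_order_line_items_fields_py_alt (rows : List (List (String × Int))) : List String :=
  match rows with
  | [] => []
  | _ :: _ =>
    let st :=
      rows.foldl (fun st r =>
        r.foldl (fun (st : PySem.Set String × List (List String)) p =>
          if PySem.Set.contains st.1 p.1 then st
          else (PySem.Set.add st.1 p.1, st.2.modify (pvRank.getD p.1 12) (fun b => b ++ [p.1]))) st)
        ((PySem.Set.empty : PySem.Set String), List.replicate 13 ([] : List String))
    st.2.flatten

-- ===== PRECONDITION & SPEC =====
def Spec_select_order_line_items_fields_py (rows : List (List (String × Int))) (out : List String) : Prop := out = select_order_line_items_fields_py_alt rows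
instance (rows : List (List (String × Int))) (out : List String) : Decidable (Spec_select_order_line_items_fields_py rows out) := by unfold Spec_select_order_line_items_fields_py; infer_instance

-- ===== CLAIM (what is proved, stated in full; the proofs are below) =====
def Claim_equal_select_order_line_items_fields_py : Prop := ∀ (rows : List (List (String × Int))), Dom_select_order_line_items_fields_py rows → Spec_select_order_line_items_fields_py rows (select_order_line_items_fields_py rows)

-- ===== LEMMAS AND PROOFS =====

-- the dedup step of A's key-collection loop
def pvAstep (acc : List String) (k : String) : List String :=
  if k ∈ acc then acc else acc ++ [k]

-- buckets of B, expressed as rank-filters of the collected key list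
def pvBucketsOf (acc : List String) : List (List String) :=
  (List.range 13).map (fun i => acc.filter (fun k => pvRank.getD k 12 == i))

theorem pvRank_items : pvRank.items =
    [("id", 0), ("order_id", 1), ("order_code", 2), ("line_number", 3), ("item_code", 4),
     ("item_description", 5), ("quantity", 6), ("unit_price", 7), ("line_total", 8),
     ("status", 9), ("created_at", 10), ("updated_at", 11)] := by decide

theorem pvRank_keys : pvRank.keys = pvPref := by decide

theorem pvRank_12_iff (k : String) : pvRank.getD k 12 = 12 ↔ k ∉ pvPref := by
  constructor
  · intro h hk
    rw [← pvRank_keys] at hk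
    rcases hg : pvRank.get? k with _ | v
    · rw [PySem.Dict.get?_eq_none_iff_not_mem_keys] at hg; exact hg hk
    · have hm : (k, v) ∈ pvRank.items := by apply PySem.Dict.mem_items_of_get?_eq_some; exact hg
      rw [PySem.Dict.getD_eq_get?_getD, hg] at h
      simp only [Option.getD_some] at h
      rw [pvRank_items] at hm
      simp at hm
      rcases hm with ⟨_,h2⟩|⟨_,h2⟩|⟨_,h2⟩|⟨_,h2⟩|⟨_,h2⟩|⟨_,h2⟩|⟨_,h2⟩|⟨_,h2⟩|⟨_,h2⟩|⟨_,h2⟩|⟨_,h2⟩|⟨_,h2⟩ <;> omega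
  · intro h
    have hg : pvRank.get? k = none := by
      rw [PySem.Dict.get?_eq_none_iff_not_mem_keys, pvRank_keys]; exact h
    rw [PySem.Dict.getD_eq_get?_getD, hg]; rfl

theorem pvRank_eq_iff (k : String) (i : Nat) (hi : i < 12) :
    pvRank.getD k 12 = i ↔ pvPref[i]? = some k := by
  constructor
  · intro h
    rcases hg : pvRank.get? k with _ | v
    · rw [PySem.Dict.getD_eq_get?_getD, hg] at h; simp at h; omega
    · rw [PySem.Dict.getD_eq_get?_getD, hg] at h
      simp at h
      subst h
      have hm : (k, v) ∈ pvRank.items := by apply PySem.Dict.mem_items_of_get?_eq_some; exact hg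
      rw [pvRank_items] at hm
      simp at hm
      rcases hm with ⟨h1, h2⟩ | ⟨h1, h2⟩ | ⟨h1, h2⟩ | ⟨h1, h2⟩ | ⟨h1, h2⟩ | ⟨h1, h2⟩ | ⟨h1, h2⟩ | ⟨h1, h2⟩ | ⟨h1, h2⟩ | ⟨h1, h2⟩ | ⟨h1, h2⟩ | ⟨h1, h2⟩ <;>
        (subst h1; subst h2; rfl)
  · intro h
    interval_cases i <;> (simp [pvPref] at h; subst h; decide)

theorem pvAstep_nodup {acc : List String} (k : String) (h : acc.Nodup) : (pvAstep acc k).Nodup := by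
  unfold pvAstep; split_ifs with hm
  · exact h
  · simp only [List.nodup_append, List.nodup_singleton, true_and]
    refine ⟨h, ?_⟩
    intro a ha b hb
    simp at hb
    subst hb
    exact fun e => hm (e ▸ ha)

theorem pv_modify_range_map {α : Type} (n i : Nat) (f : Nat → α) (g : α → α) :
    ((List.range n).map f).modify i g = (List.range n).map (fun j => if j = i then g (f j) else f j) := by
  apply List.ext_getElem
  · simp
  · intro j hj hj2
    simp only [List.getElem_modify, List.getElem_map, List.getElem_range]
    by_cases hij : j = i
    · simp [hij]
    · simp [hij, Ne.symm hij]

theorem pvBucketsOf_astep (acc : List String) (k : String) :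
    pvBucketsOf (pvAstep acc k) =
      if k ∈ acc then pvBucketsOf acc
      else (pvBucketsOf acc).modify (pvRank.getD k 12) (fun b => b ++ [k]) := by
  unfold pvAstep
  by_cases hm : k ∈ acc
  · simp [hm]
  · rw [if_neg hm, if_neg hm]
    unfold pvBucketsOf
    rw [pv_modify_range_map 13 (pvRank.getD k 12)]
    apply List.map_congr_left
    intro j hj
    by_cases hji : j = pvRank.getD k 12
    · subst hji
      rw [if_pos rfl, List.filter_append]
      simp
    · rw [if_neg hji, List.filter_append]
      have h1 : [k].filter (fun k' => pvRank.getD k' 12 == j) = [] := by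
        simp [Ne.symm hji]
      rw [h1, List.append_nil]

-- one dict-row of the key loops: B's state stays (keys, buckets of keys)
theorem pv_row_step (r : List (String × Int)) :
    ∀ acc : List String,
      r.foldl (fun (st : PySem.Set String × List (List String)) p =>
          if PySem.Set.contains st.1 p.1 then st
          else (PySem.Set.add st.1 p.1, st.2.modify (pvRank.getD p.1 12) (fun b => b ++ [p.1])))
        (acc, pvBucketsOf acc)
      = (r.foldl (fun acc p => pvAstep acc p.1) acc,
         pvBucketsOf (r.foldl (fun acc p => pvAstep acc p.1) acc)) := by
  induction r with
  | nil => intro acc; rfl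
  | cons p r ih =>
    intro acc
    rw [List.foldl_cons, List.foldl_cons]
    by_cases hm : p.1 ∈ acc
    · have hc : PySem.Set.contains acc p.1 = true := by simp [PySem.Set.contains, hm]
      have ha : pvAstep acc p.1 = acc := if_pos hm
      simp only [hc, if_true, ha]
      exact ih acc
    · have hc : PySem.Set.contains acc p.1 = false := by simp [PySem.Set.contains, hm]
      have ha : pvAstep acc p.1 = acc ++ [p.1] := if_neg hm
      have hadd : PySem.Set.add acc p.1 = acc ++ [p.1] := by
        simp [PySem.Set.add, PySem.Set.contains, hm]
      have hb : (pvBucketsOf acc).modify (pvRank.getD p.1 12) (fun b => b ++ [p.1])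
          = pvBucketsOf (pvAstep acc p.1) := by
        rw [pvBucketsOf_astep, if_neg hm]
      simp only [hc, Bool.false_eq_true, if_false, hadd, hb, ha]
      rw [← ha]
      exact ih (pvAstep acc p.1)

theorem pv_rows_step (rows : List (List (String × Int))) :
    ∀ acc : List String,
      rows.foldl (fun st r =>
        r.foldl (fun (st : PySem.Set String × List (List String)) p =>
          if PySem.Set.contains st.1 p.1 then st
          else (PySem.Set.add st.1 p.1, st.2.modify (pvRank.getD p.1 12) (fun b => b ++ [p.1]))) st)
        (acc, pvBucketsOf acc)
      = (rows.foldl (fun acc r => r.foldl (fun acc p => pvAstep acc p.1) acc) acc,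
         pvBucketsOf (rows.foldl (fun acc r => r.foldl (fun acc p => pvAstep acc p.1) acc) acc)) := by
  induction rows with
  | nil => intro acc; rfl
  | cons r rows ih => intro acc; rw [List.foldl_cons, List.foldl_cons, pv_row_step r acc, ih]

theorem pv_row_nodup (r : List (String × Int)) :
    ∀ acc : List String, acc.Nodup → (r.foldl (fun acc p => pvAstep acc p.1) acc).Nodup := by
  induction r with
  | nil => intro acc h; exact h
  | cons p r ih => intro acc h; exact ih _ (pvAstep_nodup p.1 h)

theorem pv_rows_nodup (rows : List (List (String × Int))) :
    ∀ acc : List String, acc.Nodup →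
      (rows.foldl (fun acc r => r.foldl (fun acc p => pvAstep acc p.1) acc) acc).Nodup := by
  induction rows with
  | nil => intro acc h; exact h
  | cons r rows ih => intro acc h; exact ih _ (pv_row_nodup r acc h)

-- A's extend loop appends exactly the keys not already present
theorem pv_extend_foldl (xs : List String) :
    ∀ ord : List String, xs.Nodup →
      xs.foldl (fun ord k => if k ∈ ord then ord else ord ++ [k]) ord
        = ord ++ xs.filter (fun k => !decide (k ∈ ord)) := by
  induction xs with
  | nil => intro ord _; simp
  | cons x xs ih =>
    intro ord hnd
    have hxs : xs.Nodup := hnd.of_cons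
    have hx : x ∉ xs := (List.nodup_cons.mp hnd).1
    rw [List.foldl_cons]
    by_cases hm : x ∈ ord
    · rw [if_pos hm, ih ord hxs, List.filter_cons]
      simp [hm]
    · rw [if_neg hm, ih (ord ++ [x]) hxs, List.filter_cons]
      simp only [hm, decide_false, Bool.not_false, if_true]
      have hcg : xs.filter (fun k => !decide (k ∈ ord ++ [x])) = xs.filter (fun k => !decide (k ∈ ord)) := by
        apply List.filter_congr
        intro k hk
        have : k ≠ x := fun e => hx (e ▸ hk)
        simp [List.mem_append, this]
      rw [hcg]
      simp

theorem pv_filter_eq_singleton {ks : List String} (a : String) (h : ks.Nodup) :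
    ks.filter (fun k => k == a) = if a ∈ ks then [a] else [] := by
  rw [List.filter_beq]
  by_cases hm : a ∈ ks
  · rw [if_pos hm, List.count_eq_one_of_mem h hm]; rfl
  · rw [if_neg hm, List.count_eq_zero_of_not_mem hm]; rfl

theorem pv_bucket_congr (i : Nat) (a : String) (hspec : ∀ k, pvRank.getD k 12 = i ↔ k = a) (ks : List String) :
    ks.filter (fun k => pvRank.getD k 12 == i) = ks.filter (fun k => k == a) := by
  apply List.filter_congr
  intro k _
  by_cases h : k = a
  · subst h; simp [(hspec k).mpr rfl]
  · have hne : pvRank.getD k 12 ≠ i := fun e => h ((hspec k).mp e)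
    simp [h, hne]

theorem pv_filter_mem (ps : List String) (ks : List String) :
    ps.filter (fun c => decide (c ∈ ks)) = ps.flatMap (fun a => if a ∈ ks then [a] else []) := by
  induction ps with
  | nil => rfl
  | cons a ps ih =>
    rw [List.filter_cons, List.flatMap_cons, ih]
    by_cases hm : a ∈ ks <;> simp [hm]

theorem pv_filter_ord0 (ks : List String) :
    ks.filter (fun k => !decide (k ∈ pvPref.filter (fun c => decide (c ∈ ks))))
      = ks.filter (fun k => !decide (k ∈ pvPref)) := by
  apply List.filter_congr
  intro k hk
  have hiff : (k ∈ pvPref.filter (fun c => decide (c ∈ ks))) ↔ k ∈ pvPref := by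
    rw [List.mem_filter]
    exact ⟨fun h2 => h2.1, fun h2 => ⟨h2, by simp [hk]⟩⟩
  simp [hiff]

theorem pv_main (ks : List String) (h : ks.Nodup) :
    pvPref.filter (fun c => decide (c ∈ ks)) ++ ks.filter (fun k => !decide (k ∈ pvPref))
      = (pvBucketsOf ks).flatten := by
  have hspec : ∀ i : Nat, i < 12 → ∀ a : String, pvPref[i]? = some a →
      ks.filter (fun k => pvRank.getD k 12 == i) = if a ∈ ks then [a] else [] := by
    intro i hi a ha
    rw [pv_bucket_congr i a (fun k => by rw [pvRank_eq_iff k i hi, ha]; simp [eq_comm]) ks]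
    exact pv_filter_eq_singleton a h
  have b0 := hspec 0 (by omega) "id" rfl
  have b1 := hspec 1 (by omega) "order_id" rfl
  have b2 := hspec 2 (by omega) "order_code" rfl
  have b3 := hspec 3 (by omega) "line_number" rfl
  have b4 := hspec 4 (by omega) "item_code" rfl
  have b5 := hspec 5 (by omega) "item_description" rfl
  have b6 := hspec 6 (by omega) "quantity" rfl
  have b7 := hspec 7 (by omega) "unit_price" rfl
  have b8 := hspec 8 (by omega) "line_total" rfl
  have b9 := hspec 9 (by omega) "status" rfl
  have b10 := hspec 10 (by omega) "created_at" rfl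
  have b11 := hspec 11 (by omega) "updated_at" rfl
  have b12 : ks.filter (fun k => pvRank.getD k 12 == 12) = ks.filter (fun k => !decide (k ∈ pvPref)) := by
    apply List.filter_congr
    intro k _
    by_cases hp : k ∈ pvPref
    · have hne : pvRank.getD k 12 ≠ 12 := fun e => (pvRank_12_iff k).mp e hp
      simp [hne, hp]
    · simp [(pvRank_12_iff k).mpr hp, hp]
  have hrange : List.range 13 = [0,1,2,3,4,5,6,7,8,9,10,11,12] := by decide
  unfold pvBucketsOf
  rw [hrange]
  simp only [List.map_cons, List.map_nil, List.flatten_cons, List.flatten_nil]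
  rw [b0, b1, b2, b3, b4, b5, b6, b7, b8, b9, b10, b11, b12, pv_filter_mem pvPref ks]
  simp only [pvPref, List.flatMap_cons, List.flatMap_nil]
  simp [List.append_assoc]

-- ===== VERDICT (by name: the statement is the Claim_ definition above) =====
theorem select_order_line_items_fields_py_spec : Claim_equal_select_order_line_items_fields_py := by
  intro rows _
  unfold Spec_select_order_line_items_fields_py
  cases rows with
  | nil => rfl
  | cons r rs =>
    show (((r :: rs).foldl (fun acc r => r.foldl (fun acc p => pvAstep acc p.1) acc) []).foldl
            (fun ord k => if k ∈ ord then ord else ord ++ [k])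
            (pvPref.filter (fun c => decide (c ∈ ((r :: rs).foldl (fun acc r => r.foldl (fun acc p => pvAstep acc p.1) acc) [])))))
        = ((r :: rs).foldl (fun st r' =>
              r'.foldl (fun (st : PySem.Set String × List (List String)) p =>
                if PySem.Set.contains st.1 p.1 then st
                else (PySem.Set.add st.1 p.1, st.2.modify (pvRank.getD p.1 12) (fun b => b ++ [p.1]))) st)
              ((PySem.Set.empty : PySem.Set String), List.replicate 13 ([] : List String))).2.flatten
    have hnd : ((r :: rs).foldl (fun acc r => r.foldl (fun acc p => pvAstep acc p.1) acc) []).Nodup :=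
      pv_rows_nodup (r :: rs) [] List.nodup_nil
    have hinit : ((PySem.Set.empty : PySem.Set String), List.replicate 13 ([] : List String))
        = (([] : List String), pvBucketsOf []) := by
      constructor
    have hB := pv_rows_step (r :: rs) []
    rw [hinit, hB]
    rw [pv_extend_foldl _ _ hnd]
    rw [pv_filter_ord0]
    exact pv_main _ hnd
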